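-- pv_equiv track=rewrite | github.com/brwoods/experiment1 | CHAPTER8/most_students.py | most_students
-- ===== SOURCE A (Python) =====
-- def most_students(classroom):
--     '''
--     classroom is a list of lists
--     Each ' ' is an empty seat
--     Each 'S' is a student
--
--     Find the most students seated consecutively in a row
--
--     >>> most_students([['S', ' ', 'S', ' ', 'S', 'S'],['S', ' ', 'S', 'S', 'S', ' '],[' ', 'S', ' ', 'S', ' ', ' ']])
--     3
--     >>> most_students([['S', ' ', 'S', 'S', 'S', 'S'],['S', ' ', 'S', 'S', 'S', ' '],[' ', 'S', ' ', 'S', ' ', 'S']])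
--     4
--     >>> most_students([['S', 'S', 'S', 'S', 'S', 'S'],['S', ' ', 'S', 'S', 'S', ' '],[' ', 'S', ' ', 'S', ' ', ' ']])
--     6
--     >>> most_students([[' ', ' ', ' ', ' ', ' ', ' '],[' ', ' ', ' ', ' ', ' ', ' '],[' ', ' ', ' ', ' ', ' ', ' ']])
--     0
--     '''
--     max_count = 0
--     for row in classroom:
--         count = 0
--         for seat in row:
--             if seat == 'S':
--                 count += 1
--                 if count > max_count:
--                     max_count = count
--             else:
--                 count = 0
--     return max_count
-- ===== SOURCE B (Python) =====
-- def most_students(classroom):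
--     # Two-pointer run scan: locate each maximal block of 'S' by jumping an
--     # index to the block's end and measuring it by index difference, instead
--     # of a per-seat counter with resets.
--     best = 0
--     for row in classroom:
--         n = len(row)
--         i = 0
--         while i < n:
--             if row[i] != 'S':
--                 i += 1
--                 continue
--             j = i
--             while j < n and row[j] == 'S':
--                 j += 1
--             if j - i > best:
--                 best = j - i
--             i = j
--     return best
-- ===== Notes on version B (the rewrite author's own statement) =====
-- stated objective: alternative
-- what changed: Replaces the per-seat counter with reset-on-gap by a two-pointer scan that jumps an index over each maximal 'S' block and measures the block by index difference.
import Mathlib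
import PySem

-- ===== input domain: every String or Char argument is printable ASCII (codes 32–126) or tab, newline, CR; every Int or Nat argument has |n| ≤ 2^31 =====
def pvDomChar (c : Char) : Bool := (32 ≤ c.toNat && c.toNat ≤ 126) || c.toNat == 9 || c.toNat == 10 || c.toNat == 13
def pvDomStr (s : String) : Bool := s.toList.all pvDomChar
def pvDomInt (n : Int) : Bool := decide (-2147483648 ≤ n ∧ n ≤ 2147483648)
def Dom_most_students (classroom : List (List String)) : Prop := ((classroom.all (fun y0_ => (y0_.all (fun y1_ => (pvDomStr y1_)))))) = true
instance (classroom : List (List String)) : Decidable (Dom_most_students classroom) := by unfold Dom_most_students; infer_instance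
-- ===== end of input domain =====

-- B replaces A's per-seat counter/reset by a two-pointer scan over maximal 'S' blocks (alternative decomposition, same cost).

-- ===== PORT A =====
-- inner loop state: (max_count, count)
def most_students (classroom : List (List String)) : Int :=
  classroom.foldl (fun max_count row =>
    (row.foldl (fun (st : Int × Int) seat =>
        if seat = "S" then
          let count := st.2 + 1
          (if count > st.1 then count else st.1, count)
        else (st.1, 0))
      (max_count, 0)).1) 0

-- ===== PORT B =====
-- inner while loop: advance j while row[j] == 'S'
def runEnd (row : List String) (j : Nat) : Nat :=
  if h : j < row.length then
    if PySem.List.pyGet? row (j : Int) = some "S" then runEnd row (j + 1) else j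
  else j
termination_by row.length - j

theorem le_runEnd (row : List String) (j : Nat) : j ≤ runEnd row j := by
  rw [runEnd]
  split
  · split
    · have := le_runEnd row (j + 1); omega
    · exact le_refl j
  · exact le_refl j
termination_by row.length - j

theorem lt_runEnd (row : List String) (j : Nat) (h : j < row.length)
    (hs : PySem.List.pyGet? row (j : Int) = some "S") : j < runEnd row j := by
  rw [runEnd]
  simp only [h, dif_pos, hs, if_pos]
  have := le_runEnd row (j + 1); omega

-- outer while loop of a row: skip a non-'S' seat, or jump over a whole 'S' block
def rowLoop (row : List String) (best : Int) (i : Nat) : Int :=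
  if h : i < row.length then
    if hs : PySem.List.pyGet? row (i : Int) = some "S" then
      let j := runEnd row i
      rowLoop row (if (j : Int) - (i : Int) > best then (j : Int) - (i : Int) else best) j
    else rowLoop row best (i + 1)
  else best
termination_by row.length - i
decreasing_by
  · have := lt_runEnd row i h hs; omega
  · omega

def most_students_alt (classroom : List (List String)) : Int :=
  classroom.foldl (fun best row => rowLoop row best 0) 0

-- ===== PRECONDITION & SPEC =====
def Spec_most_students (classroom : List (List String)) (out : Int) : Prop := out = most_students_alt classroom
instance (classroom : List (List String)) (out : Int) : Decidable (Spec_most_students classroom out) := by unfold Spec_most_students; infer_instance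

-- ===== CLAIM (what is proved, stated in full; the proofs are below) =====
def Claim_equal_most_students : Prop := ∀ (classroom : List (List String)), Dom_most_students classroom → Spec_most_students classroom (most_students classroom)

-- ===== LEMMAS AND PROOFS =====

-- A's inner per-seat step
def stepA (st : Int × Int) (seat : String) : Int × Int :=
  if seat = "S" then
    let count := st.2 + 1
    (if count > st.1 then count else st.1, count)
  else (st.1, 0)

theorem runEnd_le_length (row : List String) (j : Nat) (h : j ≤ row.length) :
    runEnd row j ≤ row.length := by
  rw [runEnd]
  split
  · split
    · exact runEnd_le_length row (j + 1) (by omega)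
    · exact h
  · exact h
termination_by row.length - j

theorem runEnd_mem (row : List String) (j k : Nat) (hj : j ≤ k) (hk : k < runEnd row j) :
    PySem.List.pyGet? row (k : Int) = some "S" := by
  rw [runEnd] at hk
  by_cases h : j < row.length
  · simp only [h, dif_pos] at hk
    by_cases hs : PySem.List.pyGet? row (j : Int) = some "S"
    · simp only [hs, if_pos] at hk
      rcases Nat.eq_or_lt_of_le hj with rfl | hlt
      · exact hs
      · exact runEnd_mem row (j + 1) k (by omega) hk
    · simp only [hs, if_neg, not_false_iff] at hk; omega
  · simp only [h, dif_neg, not_false_iff] at hk; omega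
termination_by row.length - j

theorem runEnd_stop (row : List String) (j : Nat) (h : runEnd row j < row.length) :
    ¬ PySem.List.pyGet? row ((runEnd row j : Nat) : Int) = some "S" := by
  by_cases hj : j < row.length
  · by_cases hs : PySem.List.pyGet? row (j : Int) = some "S"
    · have hg : row[j] = "S" := by
        rw [PySem.List.pyGet?_natCast, List.getElem?_eq_getElem hj] at hs
        exact Option.some.inj hs
      have h' : runEnd row j = runEnd row (j + 1) := by
        conv_lhs => rw [runEnd]
        simp [hj, hg]
      rw [h']
      exact runEnd_stop row (j + 1) (h' ▸ h)
    · have hg : ¬ row[j] = "S" := by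
        intro hc
        exact hs (by rw [PySem.List.pyGet?_natCast, List.getElem?_eq_getElem hj, hc])
      have h' : runEnd row j = j := by
        conv_lhs => rw [runEnd]
        simp [hj, hg]
      rw [h']
      exact hs
  · have h' : runEnd row j = j := by
      conv_lhs => rw [runEnd]
      simp [hj]
    rw [h'] at h
    omega
termination_by row.length - j

-- A's port is the inline-lambda fold; name the step for the lemmas
theorem most_students_eq_fold (classroom : List (List String)) :
    most_students classroom
      = classroom.foldl (fun mc row => (row.foldl stepA (mc, 0)).1) 0 := rfl

-- max_count never decreases through A's inner fold
theorem foldA_mono (l : List String) : ∀ (mc c : Int), mc ≤ (l.foldl stepA (mc, c)).1 := by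
  induction l with
  | nil => intro mc c; exact le_refl mc
  | cons s t ih =>
    intro mc c
    simp only [List.foldl_cons, stepA]
    split
    · exact le_trans (by split <;> omega) (ih _ _)
    · exact ih mc 0

-- an all-'S' block folded through A's step: max_count absorbs the block length
theorem foldA_block (row : List String) (L : Nat) :
    ∀ (i : Nat) (mc c : Int), c ≤ mc → i + L ≤ row.length →
    (∀ k : Nat, i ≤ k → k < i + L → PySem.List.pyGet? row (k : Int) = some "S") →
    ((row.drop i).foldl stepA (mc, c)).1
      = ((row.drop (i + L)).foldl stepA (if c + L > mc then c + L else mc, c + L)).1 := by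
  induction L with
  | zero =>
    intro i mc c hc _ _
    have h1 : (if c + (0:Nat) > mc then c + (0:Nat) else mc) = mc := by
      push_cast; split <;> omega
    have h2 : c + ((0:Nat):Int) = c := by push_cast; ring
    rw [Nat.add_zero, h1, h2]
  | succ L ih =>
    intro i mc c hc hlen hall
    have hi : i < row.length := by omega
    rw [List.drop_eq_getElem_cons hi, List.foldl_cons]
    have hS : row[i] = "S" := by
      have := hall i (le_refl i) (by omega)
      rw [PySem.List.pyGet?_natCast, List.getElem?_eq_getElem hi] at this
      exact Option.some.inj this
    have hstep : stepA (mc, c) row[i] = (if c + 1 > mc then c + 1 else mc, c + 1) := by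
      simp [stepA, hS]
    rw [hstep]
    have := ih (i + 1) (if c + 1 > mc then c + 1 else mc) (c + 1)
      (by split <;> omega) (by omega)
      (fun k hk1 hk2 => hall k (by omega) (by omega))
    rw [this]
    have e1 : i + 1 + L = i + (L + 1) := by omega
    have e2 : (if c + 1 + (L:Int) > (if c + 1 > mc then c + 1 else mc) then c + 1 + (L:Int)
        else (if c + 1 > mc then c + 1 else mc)) = (if c + ((L+1 : Nat):Int) > mc then c + ((L+1:Nat):Int) else mc) := by
      push_cast; split_ifs <;> omega
    have e3 : c + 1 + (L:Int) = c + ((L+1 : Nat):Int) := by push_cast; ring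
    rw [e1, e2, e3]

-- B's row scan computes A's inner fold on the remaining suffix
theorem rowLoop_eq (row : List String) : ∀ (m i : Nat) (best : Int), row.length - i ≤ m → 0 ≤ best →
    rowLoop row best i = ((row.drop i).foldl stepA (best, 0)).1 := by
  intro m
  induction m with
  | zero =>
    intro i best hm _
    have hi : ¬ i < row.length := by omega
    rw [rowLoop, dif_neg hi, List.drop_eq_nil_of_le (by omega), List.foldl_nil]
  | succ m ih =>
    intro i best hm hb
    by_cases hi : i < row.length
    · by_cases hs : PySem.List.pyGet? row (i : Int) = some "S"
      · rw [rowLoop, dif_pos hi, dif_pos hs]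
        set j := runEnd row i with hj
        have hij : i < j := lt_runEnd row i hi hs
        have hjl : j ≤ row.length := runEnd_le_length row i (by omega)
        have hblock := foldA_block row (j - i) i best 0 hb (by omega)
          (fun k hk1 hk2 => runEnd_mem row i k hk1 (by omega))
        have hji : i + (j - i) = j := by omega
        rw [hji] at hblock
        have hcast : ((j - i : Nat) : Int) = (j : Int) - (i : Int) := by push_cast [Nat.cast_sub (le_of_lt hij)]; ring
        have hb' : (0 : Int) + ((j - i : Nat) : Int) = (j:Int) - (i:Int) := by rw [hcast]; ring
        have hbest' : (if (0:Int) + ((j - i : Nat):Int) > best then (0:Int) + ((j - i:Nat):Int) else best)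
            = (if (j:Int) - (i:Int) > best then (j:Int) - (i:Int) else best) := by rw [hb']
        rw [hblock, hbest', hb']
        set best' := if (j:Int) - (i:Int) > best then (j:Int) - (i:Int) else best with hbd
        have hbest'_nonneg : 0 ≤ best' := by rw [hbd]; split <;> omega
        rw [ih j best' (by omega) hbest'_nonneg]
        -- drop the leftover count (j - i): the next seat (if any) is not "S"
        by_cases hjlen : j < row.length
        · have hns : ¬ row[j] = "S" := by
            intro hc
            exact runEnd_stop row i (hjlen) (by
              rw [← hj, PySem.List.pyGet?_natCast, List.getElem?_eq_getElem hjlen, hc])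
          rw [List.drop_eq_getElem_cons hjlen, List.foldl_cons, List.foldl_cons]
          have h1 : stepA (best', (j:Int) - (i:Int)) row[j] = (best', 0) := by simp [stepA, hns]
          have h2 : stepA (best', 0) row[j] = (best', 0) := by simp [stepA, hns]
          rw [h1, h2]
        · rw [List.drop_eq_nil_of_le (by omega), List.foldl_nil, List.foldl_nil]
      · rw [rowLoop, dif_pos hi, dif_neg hs]
        rw [ih (i+1) best (by omega) hb]
        rw [List.drop_eq_getElem_cons hi, List.foldl_cons]
        have hns : ¬ row[i] = "S" := by
          intro hc
          exact hs (by rw [PySem.List.pyGet?_natCast, List.getElem?_eq_getElem hi, hc])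
        have h1 : stepA (best, 0) row[i] = (best, 0) := by simp [stepA, hns]
        rw [h1]
    · rw [rowLoop, dif_neg hi, List.drop_eq_nil_of_le (by omega), List.foldl_nil]

theorem outer_eq (rows : List (List String)) : ∀ (b : Int), 0 ≤ b →
    rows.foldl (fun mc row => (row.foldl stepA (mc, 0)).1) b
      = rows.foldl (fun best row => rowLoop row best 0) b := by
  induction rows with
  | nil => intro b _; rfl
  | cons row t ih =>
    intro b hb
    simp only [List.foldl_cons]
    rw [rowLoop_eq row (row.length) 0 b (by omega) hb, List.drop_zero]
    exact ih _ (le_trans hb (foldA_mono row b 0))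

-- ===== VERDICT (by name: the statement is the Claim_ definition above) =====
theorem most_students_spec : Claim_equal_most_students := by
  intro classroom _
  unfold Spec_most_students
  rw [most_students_eq_fold, outer_eq classroom 0 (le_refl 0)]
  rfl
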